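-- pv_equiv track=rewrite | github.com/julsukim/algorithm_exercise | Python/2024/2409/240930/PROG_42840.py | solution
-- ===== SOURCE A (Python) =====
-- def solution(answers):
--     p1 = [1, 2, 3, 4, 5]
--     p1_len = len(p1)
--     p2 = [2, 1, 2, 3, 2, 4, 2, 5]
--     p2_len = len(p2)
--     p3 = [3, 3, 1, 1, 2, 2, 4, 4, 5, 5]
--     p3_len = len(p3)
--
--     p1_score = 0
--     p2_score = 0
--     p3_score = 0
--
--     for i in range(len(answers)):
--         if (answers[i] == p1[i%p1_len]):
--             p1_score += 1
--         if (answers[i] == p2[i%p2_len]):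
--             p2_score += 1
--         if (answers[i] == p3[i%p3_len]):
--             p3_score += 1
--
--     max_score = max(p1_score, p2_score, p3_score)
--     # scores = [(1, p1_score), (2, p2_score), (3, p3_score)]
--     scores = [p1_score, p2_score, p3_score]
--
--     result = [x[0] for x in list(enumerate(scores, start=1)) if x[1] == max_score]
--     result.sort()
--
--     return result
-- ===== SOURCE B (Python) =====
-- def solution(answers):
--     PERIOD = 40  # lcm of the pattern lengths 5, 8, 10
--     patterns = [[1, 2, 3, 4, 5],
--                 [2, 1, 2, 3, 2, 4, 2, 5],
--                 [3, 3, 1, 1, 2, 2, 4, 4, 5, 5]]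
--     # histogram: cnt[r][v] = how many positions i with i % 40 == r hold answer v (v in 1..5)
--     cnt = [[0] * 6 for _ in range(PERIOD)]
--     for i, a in enumerate(answers):
--         if 1 <= a <= 5:
--             cnt[i % PERIOD][a] += 1
--     scores = [sum(cnt[r][p[r % len(p)]] for r in range(PERIOD)) for p in patterns]
--     best = max(scores)
--     return [k for k, s in enumerate(scores, 1) if s == best]
-- ===== Notes on version B (the rewrite author's own statement) =====
-- stated objective: alternative
-- what changed: Instead of comparing every answer against all three patterns with modular indexing, B builds a 40x6 histogram cnt[i%40][answer] in one pass (40 = lcm of the pattern periods) and then reads each pattern's score off the histogram as a 40-term table sum, so the patterns are never consulted during the pass over the answers.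
import Mathlib
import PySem

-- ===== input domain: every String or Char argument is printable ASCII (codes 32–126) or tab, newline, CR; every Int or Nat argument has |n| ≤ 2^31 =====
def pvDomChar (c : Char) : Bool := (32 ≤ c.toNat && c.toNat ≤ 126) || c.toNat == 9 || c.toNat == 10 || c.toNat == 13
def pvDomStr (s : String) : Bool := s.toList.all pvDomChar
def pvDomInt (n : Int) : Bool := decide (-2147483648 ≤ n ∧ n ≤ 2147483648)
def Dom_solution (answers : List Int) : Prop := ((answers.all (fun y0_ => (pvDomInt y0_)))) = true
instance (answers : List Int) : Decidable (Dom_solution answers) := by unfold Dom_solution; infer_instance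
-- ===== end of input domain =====

-- ===== PORT A =====
-- One line: B replaces A's per-element comparison against the three cyclic patterns by a
-- 40×6 histogram of (index mod 40, answer) built in one pass, the scores then read off the
-- histogram as 40-term table sums (objective: alternative).
def solution (answers : List Int) : List Int :=
  let p1 : List Int := [1, 2, 3, 4, 5]
  let p2 : List Int := [2, 1, 2, 3, 2, 4, 2, 5]
  let p3 : List Int := [3, 3, 1, 1, 2, 2, 4, 4, 5, 5]
  let st :=
    (PySem.List.pyRange 0 (PySem.List.len answers) 1).foldl
      (fun (s : Int × Int × Int) i =>
        ( if PySem.List.pyGetD answers i 0 = PySem.List.pyGetD p1 (PySem.Int.mod i (PySem.List.len p1)) 0 then s.1 + 1 else s.1,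
          if PySem.List.pyGetD answers i 0 = PySem.List.pyGetD p2 (PySem.Int.mod i (PySem.List.len p2)) 0 then s.2.1 + 1 else s.2.1,
          if PySem.List.pyGetD answers i 0 = PySem.List.pyGetD p3 (PySem.Int.mod i (PySem.List.len p3)) 0 then s.2.2 + 1 else s.2.2 ))
      (0, 0, 0)
  let maxScore := max (max st.1 st.2.1) st.2.2
  let scores : List Int := [st.1, st.2.1, st.2.2]
  let result := ((PySem.List.enumerate scores 1).filter (fun x => x.2 == maxScore)).map (fun x => x.1)
  PySem.List.sorted result (fun x => x) false

-- ===== PORT B =====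
-- cnt[i % 40][a] += 1, guarded by 1 <= a <= 5.  i is an enumerate index, hence i ≥ 0,
-- so PySem.Int.mod i 40 is nonnegative and .toNat is exact; all list indices are in range.
def histStep (cnt : List (List Int)) (i a : Int) : List (List Int) :=
  if 1 ≤ a ∧ a ≤ 5 then
    cnt.modify (PySem.Int.mod i 40).toNat (fun row => row.modify a.toNat (· + 1))
  else cnt

-- sum(cnt[r][p[r % len(p)]] for r in range(40)); every index is in range.
def patScore (cnt : List (List Int)) (p : List Int) : Int :=
  (PySem.List.pyRange 0 40 1).foldl
    (fun s r => s + PySem.List.pyGetD (PySem.List.pyGetD cnt r [])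
        (PySem.List.pyGetD p (PySem.Int.mod r (PySem.List.len p)) 0) 0) 0

def solution_alt (answers : List Int) : List Int :=
  let patterns : List (List Int) :=
    [[1, 2, 3, 4, 5], [2, 1, 2, 3, 2, 4, 2, 5], [3, 3, 1, 1, 2, 2, 4, 4, 5, 5]]
  let cnt := (PySem.List.enumerate answers 0).foldl (fun c q => histStep c q.1 q.2)
      (List.replicate 40 (List.replicate 6 (0 : Int)))
  let scores := patterns.map (fun p => patScore cnt p)
  let best := (PySem.List.max? scores (fun x => x)).getD 0   -- scores is nonempty, so max() never raises
  ((PySem.List.enumerate scores 1).filter (fun x => x.2 == best)).map (fun x => x.1)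

-- ===== PRECONDITION & SPEC =====
def Spec_solution (answers : List Int) (out : List Int) : Prop := out = solution_alt answers
instance (answers : List Int) (out : List Int) : Decidable (Spec_solution answers out) := by unfold Spec_solution; infer_instance

-- ===== CLAIM (what is proved, stated in full; the proofs are below) =====
def Claim_equal_solution : Prop := ∀ (answers : List Int), Dom_solution answers → Spec_solution answers (solution answers)

-- ===== LEMMAS AND PROOFS =====

-- proof-only helpers (used only by the proofs below)
def selOf (p : List Int) (r : Int) : Int :=
  PySem.List.pyGetD p (PySem.Int.mod r (PySem.List.len p)) 0

def gSel (p : List Int) (cnt : List (List Int)) (r : Int) : Int :=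
  PySem.List.pyGetD (PySem.List.pyGetD cnt r []) (selOf p r) 0

def Ssum (p : List Int) (cnt : List (List Int)) : Int :=
  ((PySem.List.pyRange 0 40 1).map (gSel p cnt)).sum

def countA (p : List Int) (l : List (Int × Int)) : Int :=
  l.foldl (fun s q => if q.2 = selOf p q.1 then s + 1 else s) 0

def HInv (cnt : List (List Int)) : Prop :=
  cnt.length = 40 ∧ ∀ r : Nat, r < 40 → (cnt.getD r []).length = 6

-- getD through List.modify
theorem getD_modify {α : Type} (f : α → α) (i : Nat) (l : List α) (j : Nat) (d : α) :
    (l.modify i f).getD j d = if i = j ∧ j < l.length then f (l.getD j d) else l.getD j d := by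
  rw [List.getD_eq_getElem?_getD, List.getD_eq_getElem?_getD, List.getElem?_modify]
  by_cases hj : j < l.length
  · rw [List.getElem?_eq_getElem hj]
    by_cases hij : i = j <;> simp [hij, hj]
  · rw [List.getElem?_eq_none (by omega)]
    simp
    omega

-- a sum over a list of indices containing r0 exactly once, where the summand changed only at r0
theorem sum_map_except (R : List Int) (g g' : Int → Int) (r0 : Int)
    (hagree : ∀ r ∈ R, r ≠ r0 → g' r = g r) (hc : R.count r0 = 1) :
    (R.map g').sum = (R.map g).sum + (g' r0 - g r0) := by
  induction R with
  | nil => simp at hc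
  | cons x t ih =>
    by_cases hx : x = r0
    · subst hx
      rw [List.count_cons_self] at hc
      have hct : t.count x = 0 := by omega
      have hnot : x ∉ t := List.count_eq_zero.mp hct
      have hte : t.map g' = t.map g := by
        apply List.map_congr_left
        intro r hr
        exact hagree r (List.mem_cons_of_mem _ hr) (by
          intro he; subst he; exact hnot hr)
      simp only [List.map_cons, List.sum_cons, hte]
      ring
    · have hne : r0 ≠ x := fun h => hx h.symm
      rw [List.count_cons_of_ne hx] at hc
      have hgx : g' x = g x := hagree x List.mem_cons_self hx
      simp only [List.map_cons, List.sum_cons, hgx,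
        ih (fun r hr h => hagree r (List.mem_cons_of_mem _ hr) h) hc]
      ring

theorem foldl_add_eq_sum (g : Int → Int) : ∀ (l : List Int) (s : Int),
    l.foldl (fun s r => s + g r) s = s + (l.map g).sum := by
  intro l
  induction l with
  | nil => intro s; simp
  | cons x t ih => intro s; simp only [List.foldl_cons, List.map_cons, List.sum_cons, ih]; ring

theorem patScore_eq_Ssum (cnt : List (List Int)) (p : List Int) :
    patScore cnt p = Ssum p cnt := by
  unfold patScore Ssum gSel selOf
  rw [foldl_add_eq_sum]
  ring

theorem countA_shift (p : List Int) : ∀ (l : List (Int × Int)) (s : Int),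
    l.foldl (fun s q => if q.2 = selOf p q.1 then s + 1 else s) s = s + countA p l := by
  intro l
  induction l with
  | nil => intro s; simp [countA]
  | cons x t ih =>
    intro s
    simp only [countA, List.foldl_cons]
    rw [ih, ih]
    split_ifs <;> ring

theorem countA_cons (p : List Int) (n : Int) (x : Int) (l : List (Int × Int)) :
    countA p ((n, x) :: l) = (if x = selOf p n then 1 else 0) + countA p l := by
  show List.foldl (fun s q => if q.2 = selOf p q.1 then s + 1 else s) 0 ((n, x) :: l) = _
  rw [List.foldl_cons]
  dsimp only
  rw [countA_shift]
  split_ifs <;> ring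

-- the pattern value selected at any nonnegative index lies in the pattern
theorem selOf_natCast (p : List Int) (n : Nat) :
    selOf p (n : Int) = p.getD (n % p.length) 0 := by
  unfold selOf
  have h1 : PySem.Int.mod (n : Int) (PySem.List.len p) = ((n % p.length : Nat) : Int) := by
    rw [PySem.List.len_eq]; exact_mod_cast PySem.Int.mod_natCast n p.length
  rw [h1, PySem.List.pyGetD_natCast]

theorem selOf_mem (p : List Int) (hpos : 0 < p.length) (n : Nat) :
    selOf p (n : Int) ∈ p := by
  rw [selOf_natCast]
  have hlt : n % p.length < p.length := Nat.mod_lt _ hpos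
  rw [List.getD_eq_getElem _ _ hlt]
  exact List.getElem_mem _

theorem HInv_histStep (cnt : List (List Int)) (h : HInv cnt) (i a : Int) :
    HInv (histStep cnt i a) := by
  unfold histStep
  split_ifs with hg
  · refine ⟨by rw [List.length_modify]; exact h.1, ?_⟩
    intro r hr
    rw [getD_modify]
    split_ifs with hc
    · rw [List.length_modify]; exact h.2 r hr
    · exact h.2 r hr
  · exact h

-- decidable facts about the literal index list range(40)
theorem count_pyRange40 : ∀ m : Nat, m < 40 → (PySem.List.pyRange 0 40 1).count ((m : Nat) : Int) = 1 := by decide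

theorem mem_pyRange40 : ∀ r ∈ PySem.List.pyRange 0 40 1, ∃ m : Nat, m < 40 ∧ r = ((m : Nat) : Int) := by decide

-- one histogram step changes the table sum by exactly A's per-element increment
theorem Ssum_histStep (p : List Int) (hpos : 0 < p.length) (hdvd : p.length ∣ 40)
    (hvals : ∀ v ∈ p, 1 ≤ v ∧ v ≤ 5)
    (cnt : List (List Int)) (hinv : HInv cnt) (n : Nat) (a : Int) :
    Ssum p (histStep cnt (n : Int) a)
      = Ssum p cnt + (if a = selOf p (n : Int) then 1 else 0) := by
  have hv := hvals _ (selOf_mem p hpos n)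
  unfold histStep
  by_cases hg : 1 ≤ a ∧ a ≤ 5
  · -- the guarded increment: compare the two 40-term sums
    rw [if_pos hg]
    have hmod : PySem.Int.mod (n : Int) 40 = ((n % 40 : Nat) : Int) := by
      exact_mod_cast PySem.Int.mod_natCast n 40
    rw [hmod, Int.toNat_natCast]
    have hm40 : n % 40 < 40 := Nat.mod_lt _ (by omega)
    have hsel40 : selOf p ((n % 40 : Nat) : Int) = selOf p (n : Int) := by
      rw [selOf_natCast, selOf_natCast, Nat.mod_mod_of_dvd n hdvd]
    set cnt' := cnt.modify (n % 40) (fun row => row.modify a.toNat (· + 1)) with hcnt'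
    have key : ∀ m : Nat, PySem.List.pyGetD cnt' ((m : Nat) : Int) [] =
        if n % 40 = m ∧ m < cnt.length then
          (cnt.getD m []).modify a.toNat (· + 1)
        else cnt.getD m [] := by
      intro m
      rw [PySem.List.pyGetD_natCast, hcnt', getD_modify]
    have hrowlen : (cnt.getD (n % 40) []).length = 6 := hinv.2 _ hm40
    have hvcast : selOf p (n : Int) = (((selOf p (n : Int)).toNat : Nat) : Int) :=
      (Int.toNat_of_nonneg (by omega)).symm
    have hdelta : gSel p cnt' ((n % 40 : Nat) : Int) - gSel p cnt ((n % 40 : Nat) : Int)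
        = (if a = selOf p (n : Int) then 1 else 0) := by
      unfold gSel
      rw [key, if_pos ⟨rfl, by rw [hinv.1]; exact hm40⟩, hsel40,
        PySem.List.pyGetD_natCast, hvcast,
        PySem.List.pyGetD_natCast, PySem.List.pyGetD_natCast, getD_modify, hrowlen]
      split_ifs <;> omega
    unfold Ssum
    rw [sum_map_except (PySem.List.pyRange 0 40 1) (gSel p cnt) (gSel p cnt')
        ((n % 40 : Nat) : Int)
        (by
          intro r hr hne
          obtain ⟨m, hm, rfl⟩ := mem_pyRange40 r hr
          have hmne : ¬ (n % 40 = m) := by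
            intro he; exact hne (by rw [he])
          unfold gSel
          rw [key, if_neg (by intro hco; exact hmne hco.1), PySem.List.pyGetD_natCast])
        (count_pyRange40 _ hm40), hdelta]
  · -- no increment: a outside 1..5 cannot equal the selected value (which is in 1..5)
    rw [if_neg hg, if_neg (by omega : ¬ a = selOf p (n : Int))]
    ring

-- the histogram fold over the enumerated suffix adds exactly A's running count
theorem hist_main (p : List Int) (hpos : 0 < p.length) (hdvd : p.length ∣ 40)
    (hvals : ∀ v ∈ p, 1 ≤ v ∧ v ≤ 5) :
    ∀ (xs : List Int) (n : Nat) (cnt : List (List Int)), HInv cnt →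
    Ssum p ((PySem.List.enumerate xs (n : Int)).foldl (fun c q => histStep c q.1 q.2) cnt)
      = Ssum p cnt + countA p (PySem.List.enumerate xs (n : Int)) := by
  intro xs
  induction xs with
  | nil =>
    intro n cnt hinv
    rw [PySem.List.enumerate_nil, List.foldl_nil]
    simp [countA]
  | cons x t ih =>
    intro n cnt hinv
    rw [PySem.List.enumerate_cons, List.foldl_cons]
    have hcast : ((n : Int) + 1) = ((n + 1 : Nat) : Int) := by push_cast; ring
    rw [hcast, countA_cons]
    show Ssum p ((PySem.List.enumerate t ((n + 1 : Nat) : Int)).foldl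
        (fun c q => histStep c q.1 q.2) (histStep cnt (n : Int) x)) = _
    rw [ih (n + 1) _ (HInv_histStep cnt hinv _ _),
      Ssum_histStep p hpos hdvd hvals cnt hinv n x]
    ring

-- A's pass over range(len(answers)) with modular indexing is the same running count
theorem scoreA_eq (answers p : List Int) :
    (PySem.List.pyRange 0 (PySem.List.len answers) 1).foldl
      (fun (s : Int) i =>
        if PySem.List.pyGetD answers i 0 = PySem.List.pyGetD p (PySem.Int.mod i (PySem.List.len p)) 0 then s + 1 else s) 0
    = countA p (PySem.List.enumerate answers 0) := by
  unfold countA selOf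
  rw [PySem.List.enumerate_eq_map_pyRange (d := 0), List.foldl_map]

-- B's full score: histogram built from zeros, then the table sum
theorem patScore_eq_countA (answers p : List Int) (hpos : 0 < p.length) (hdvd : p.length ∣ 40)
    (hvals : ∀ v ∈ p, 1 ≤ v ∧ v ≤ 5)
    (hz : Ssum p (List.replicate 40 (List.replicate 6 (0 : Int))) = 0) :
    patScore ((PySem.List.enumerate answers 0).foldl (fun c q => histStep c q.1 q.2)
        (List.replicate 40 (List.replicate 6 (0 : Int)))) p
      = countA p (PySem.List.enumerate answers 0) := by
  have hinvz : HInv (List.replicate 40 (List.replicate 6 (0 : Int))) := ⟨by decide, by decide⟩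
  have hm := hist_main p hpos hdvd hvals answers 0 _ hinvz
  simp only [Nat.cast_zero] at hm
  rw [patScore_eq_Ssum, hm, hz]
  ring

theorem sorted_filter_enum3 (a b c m : Int) :
    PySem.List.sorted
      (((PySem.List.enumerate ([a, b, c] : List Int) 1).filter (fun x => x.2 == m)).map (fun x => x.1))
      (fun x => x) false
    = ((PySem.List.enumerate ([a, b, c] : List Int) 1).filter (fun x => x.2 == m)).map (fun x => x.1) := by
  simp only [PySem.List.enumerate_cons, PySem.List.enumerate_nil, List.filter]
  by_cases h1 : a == m <;> by_cases h2 : b == m <;> by_cases h3 : c == m <;>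
    simp [h1, h2, h3] <;> decide

-- ===== VERDICT (by name: the statement is the Claim_ definition above) =====
theorem solution_spec : Claim_equal_solution := by
  intro answers _
  unfold Spec_solution solution solution_alt
  dsimp only
  rw [PySem.List.foldl_prod_mk
      (f := fun (a : Int) i =>
        if PySem.List.pyGetD answers i 0 = PySem.List.pyGetD ([1,2,3,4,5] : List Int) (PySem.Int.mod i (PySem.List.len ([1,2,3,4,5] : List Int))) 0 then a + 1 else a)
      (g := fun (b : Int × Int) i =>
        ( if PySem.List.pyGetD answers i 0 = PySem.List.pyGetD ([2,1,2,3,2,4,2,5] : List Int) (PySem.Int.mod i (PySem.List.len ([2,1,2,3,2,4,2,5] : List Int))) 0 then b.1 + 1 else b.1,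
          if PySem.List.pyGetD answers i 0 = PySem.List.pyGetD ([3,3,1,1,2,2,4,4,5,5] : List Int) (PySem.Int.mod i (PySem.List.len ([3,3,1,1,2,2,4,4,5,5] : List Int))) 0 then b.2 + 1 else b.2 ))]
  rw [PySem.List.foldl_prod_mk
      (f := fun (a : Int) i =>
        if PySem.List.pyGetD answers i 0 = PySem.List.pyGetD ([2,1,2,3,2,4,2,5] : List Int) (PySem.Int.mod i (PySem.List.len ([2,1,2,3,2,4,2,5] : List Int))) 0 then a + 1 else a)
      (g := fun (a : Int) i =>
        if PySem.List.pyGetD answers i 0 = PySem.List.pyGetD ([3,3,1,1,2,2,4,4,5,5] : List Int) (PySem.Int.mod i (PySem.List.len ([3,3,1,1,2,2,4,4,5,5] : List Int))) 0 then a + 1 else a)]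
  rw [scoreA_eq answers [1,2,3,4,5], scoreA_eq answers [2,1,2,3,2,4,2,5],
      scoreA_eq answers [3,3,1,1,2,2,4,4,5,5]]
  simp only [List.map]
  rw [patScore_eq_countA answers [1,2,3,4,5] (by decide) (by decide) (by decide) (by decide),
      patScore_eq_countA answers [2,1,2,3,2,4,2,5] (by decide) (by decide) (by decide) (by decide),
      patScore_eq_countA answers [3,3,1,1,2,2,4,4,5,5] (by decide) (by decide) (by decide) (by decide)]
  simp only [PySem.List.max?_id_cons, List.foldl, Option.getD_some]
  exact sorted_filter_enum3 _ _ _ _
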